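-- pv_equiv track=rewrite | github.com/LittleHubOnThePrairie/Protocol-To-Cohort-Viz | scripts/analyze_extraction_quality.py | parent_section
-- ===== SOURCE A (Python) =====
-- PARENT_ORDER: list[str] = [
--     "B.1", "B.2", "B.3", "B.4", "B.5", "B.6", "B.7", "B.8",
--     "B.9", "B.10", "B.11", "B.12", "B.13", "B.14", "B.15", "B.16",
-- ]
--
-- def parent_section(section_id: str) -> str:
--     """Extract parent section: 'B.4.3' -> 'B.4', 'B.11' -> 'B.11'."""
--     parts = section_id.split(".")
--     if len(parts) >= 2:
--         candidate = f"{parts[0]}.{parts[1]}"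
--         # B.10 through B.16 are two-digit; check if section_id starts
--         # with a known parent that has sub-sections
--         if candidate in PARENT_ORDER:
--             return candidate
--         # Might be a deeper sub-section like B.10.3 — parent is B.10
--         # Walk up until we find a known parent
--         for i in range(min(3, len(parts)), 1, -1):
--             attempt = ".".join(parts[:i])
--             if attempt in PARENT_ORDER:
--                 return attempt
--     return section_id
-- ===== SOURCE B (Python) =====
-- PARENT_ORDER: list[str] = [
--     "B.1", "B.2", "B.3", "B.4", "B.5", "B.6", "B.7", "B.8",
--     "B.9", "B.10", "B.11", "B.12", "B.13", "B.14", "B.15", "B.16",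
-- ]
--
-- def parent_section(section_id: str) -> str:
--     """Extract parent section: 'B.4.3' -> 'B.4', 'B.11' -> 'B.11'."""
--     for p in PARENT_ORDER:
--         if section_id == p or section_id.startswith(p + "."):
--             return p
--     return section_id
-- ===== Notes on version B (the rewrite author's own statement) =====
-- stated objective: idiomatic
-- what changed: Replaces split-into-parts, rebuild-candidate, membership test and a dead walk-up loop by a single first-match scan over PARENT_ORDER using equality or a dot-guarded prefix test.
import Mathlib
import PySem

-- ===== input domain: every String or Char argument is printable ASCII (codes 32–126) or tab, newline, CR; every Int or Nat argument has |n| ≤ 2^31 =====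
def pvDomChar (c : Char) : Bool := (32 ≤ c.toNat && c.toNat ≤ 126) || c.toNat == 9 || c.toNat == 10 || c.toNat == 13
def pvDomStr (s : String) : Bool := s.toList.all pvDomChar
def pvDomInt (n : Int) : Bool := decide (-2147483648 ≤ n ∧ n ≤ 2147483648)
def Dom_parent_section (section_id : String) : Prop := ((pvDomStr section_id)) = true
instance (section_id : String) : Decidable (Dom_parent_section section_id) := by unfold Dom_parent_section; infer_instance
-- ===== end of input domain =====

-- B replaces A's split/rebuild/membership approach (plus its dead walk-up loop) by one
-- first-match scan over PARENT_ORDER with an equality-or-dot-guarded-prefix test (objective: idiomatic).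

-- ===== PORT A =====
def PARENT_ORDER : List (List Char) :=
  ["B.1".toList, "B.2".toList, "B.3".toList, "B.4".toList, "B.5".toList, "B.6".toList,
   "B.7".toList, "B.8".toList, "B.9".toList, "B.10".toList, "B.11".toList, "B.12".toList,
   "B.13".toList, "B.14".toList, "B.15".toList, "B.16".toList]

def parent_section (section_id : String) : String :=
  let parts := PySem.Chars.splitOn section_id.toList ['.']
  if 2 ≤ parts.length then
    let candidate := parts[0]! ++ ['.'] ++ parts[1]!
    if candidate ∈ PARENT_ORDER then String.ofList candidate
    else
      match (PySem.List.pyRange (min 3 (parts.length : Int)) 1 (-1)).foldl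
        (fun acc i =>
          match acc with
          | some r => some r
          | none =>
            let attempt := PySem.Chars.join ['.'] (PySem.List.slice parts none (some i))
            if attempt ∈ PARENT_ORDER then some attempt else none) none with
      | some r => String.ofList r
      | none => section_id
  else section_id

-- ===== PORT B =====
def parent_section_alt (section_id : String) : String :=
  match PARENT_ORDER.find? (fun p =>
      section_id.toList == p || PySem.Chars.startswith section_id.toList (p ++ ['.'])) with
  | some p => String.ofList p
  | none => section_id

-- ===== PRECONDITION & SPEC =====
def Spec_parent_section (section_id : String) (out : String) : Prop := out = parent_section_alt section_id
instance (section_id : String) (out : String) : Decidable (Spec_parent_section section_id out) := by unfold Spec_parent_section; infer_instance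

-- ===== CLAIM (what is proved, stated in full; the proofs are below) =====
def Claim_equal_parent_section : Prop := ∀ (section_id : String), Dom_parent_section section_id → Spec_parent_section section_id (parent_section section_id)

-- ===== LEMMAS AND PROOFS =====

/-- Reference structural form of Python's split on a single '.'. -/
def splitDot : List Char → List (List Char)
  | [] => [[]]
  | '.' :: t => [] :: splitDot t
  | c :: t => (splitDot t).modifyHead (c :: ·)

lemma splitDot_cons (c : Char) (t : List Char) :
    splitDot (c :: t) = if c = '.' then [] :: splitDot t else (splitDot t).modifyHead (c :: ·) := by
  by_cases h : c = '.'
  · subst h; simp [splitDot]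
  · simp only [h, if_false]
    conv_lhs => rw [splitDot.eq_def]
    split
    · simp_all
    · simp_all
    · rename_i c' t' _ heq
      obtain ⟨rfl, rfl⟩ : c = c' ∧ t = t' := ⟨(List.cons.inj heq).1, (List.cons.inj heq).2⟩
      rfl

lemma splitDot_ne_nil (l : List Char) : splitDot l ≠ [] := by
  induction l with
  | nil => simp [splitDot]
  | cons c t ih =>
    rw [splitDot_cons]
    split
    · simp
    · cases hs : splitDot t with
      | nil => exact absurd hs ih
      | cons a r => simp

lemma modifyHead_modifyHead {α : Type} (f g : α → α) (l : List α) :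
    (l.modifyHead g).modifyHead f = l.modifyHead (f ∘ g) := by
  cases l <;> simp

lemma splitDot_go_eq (l : List Char) : ∀ (fuel : Nat) (cur : List Char) (accl : List (List Char)),
    l.length < fuel →
    PySem.Chars.splitOn.go ['.'] fuel l cur accl =
      accl.reverse ++ (splitDot l).modifyHead (cur.reverse ++ ·) := by
  induction l with
  | nil =>
    intro fuel cur accl h
    cases fuel with
    | zero => omega
    | succ f => simp [PySem.Chars.splitOn.go, splitDot]
  | cons c t ih =>
    intro fuel cur accl h
    cases fuel with
    | zero => simp at h
    | succ f =>
      rw [PySem.Chars.splitOn.go]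
      by_cases hc : c = '.'
      · subst hc
        have hpre : List.isPrefixOf ['.'] ('.' :: t) = true := by simp [List.isPrefixOf]
        rw [hpre]
        simp only [List.length_cons] at *
        simp only [List.length_nil, List.drop_succ_cons, List.drop_zero, if_true]
        rw [ih f [] (cur.reverse :: accl) (by omega)]
        rw [splitDot_cons]
        simp only [List.reverse_cons, List.append_assoc, List.singleton_append]
        cases hs : splitDot t with
        | nil => exact absurd hs (splitDot_ne_nil t)
        | cons a r => simp
      · have hpre : List.isPrefixOf ['.'] (c :: t) = false := by
          simp [List.isPrefixOf]; exact fun h' => absurd h'.symm hc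
        rw [hpre]
        simp only [List.length_cons] at *
        rw [ih f (c :: cur) accl (by omega)]
        rw [splitDot_cons, if_neg hc, modifyHead_modifyHead]
        cases hs : splitDot t with
        | nil => exact absurd hs (splitDot_ne_nil t)
        | cons a r => simp

lemma splitOn_eq_splitDot (l : List Char) :
    PySem.Chars.splitOn l ['.'] = splitDot l := by
  rw [PySem.Chars.splitOn, splitDot_go_eq l (l.length+1) [] [] (by omega)]
  rw [show (fun x => ([] : List Char).reverse ++ x) = (fun x : List Char => x) by funext x; simp]
  cases splitDot l <;> simp

lemma splitDot_unfold (l : List Char) :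
    splitDot l = l.takeWhile (· ≠ '.') ::
      (match l.dropWhile (· ≠ '.') with
       | [] => []
       | _ :: t => splitDot t) := by
  induction l with
  | nil => simp [splitDot]
  | cons c t ih =>
    rw [splitDot_cons]
    by_cases hc : c = '.'
    · subst hc; simp [List.takeWhile, List.dropWhile]
    · rw [if_neg hc, ih]
      simp [hc]

lemma splitDot_of_drop_nil (l : List Char) (h : l.dropWhile (· ≠ '.') = []) :
    splitDot l = [l.takeWhile (· ≠ '.')] := by
  rw [splitDot_unfold, h]

lemma splitDot_of_drop_cons (l t : List Char) (h : l.dropWhile (· ≠ '.') = '.' :: t) :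
    splitDot l = l.takeWhile (· ≠ '.') :: splitDot t := by
  rw [splitDot_unfold, h]

/-- Splitting a list at the first dot is unambiguous when neither left part contains a dot. -/
lemma split_at_dot_inj (a : List Char) : ∀ (a' b b' : List Char), '.' ∉ a → '.' ∉ a' →
    a ++ '.' :: b = a' ++ '.' :: b' → a = a' ∧ b = b' := by
  induction a with
  | nil =>
    intro a' b b' _ ha' h
    cases a' with
    | nil => simpa using h
    | cons x u =>
      simp only [List.nil_append, List.cons_append, List.cons.injEq] at h
      exact absurd (h.1 ▸ List.mem_cons_self) ha'
  | cons x u ih =>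
    intro a' b b' ha ha' h
    cases a' with
    | nil =>
      simp only [List.cons_append, List.nil_append, List.cons.injEq] at h
      exact absurd (h.1 ▸ List.mem_cons_self) ha
    | cons y v =>
      simp only [List.cons_append, List.cons.injEq] at h
      obtain ⟨rfl, h2⟩ := h
      have ha1 : '.' ∉ u := fun hm => ha (List.mem_cons_of_mem _ hm)
      have ha1' : '.' ∉ v := fun hm => ha' (List.mem_cons_of_mem _ hm)
      obtain ⟨rfl, rfl⟩ := ih v b b' ha1 ha1' h2
      exact ⟨rfl, rfl⟩

/-- B's per-parent test, characterised: it holds exactly when A's candidate equals the parent. -/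
lemma match_iff (a b r2 ds : List Char) (ha : '.' ∉ a) (hb : '.' ∉ b) (hds : '.' ∉ ds)
    (hr2 : ∀ c t, r2 = c :: t → c = '.') :
    (a ++ '.' :: (b ++ r2) = 'B' :: '.' :: ds ∨
      ('B' :: '.' :: ds ++ ['.']) <+: (a ++ '.' :: (b ++ r2)))
      ↔ (a = ['B'] ∧ b = ds) := by
  have hB : '.' ∉ ['B'] := by decide
  constructor
  · rintro (heq | ⟨rest, hrest⟩)
    · have h := split_at_dot_inj a ['B'] (b ++ r2) ds ha hB (by simpa using heq)
      obtain ⟨rfl, h2⟩ := h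
      cases hr : r2 with
      | nil => exact ⟨rfl, by simpa [hr] using h2⟩
      | cons c t =>
        obtain rfl := hr2 c t hr
        exact absurd (h2 ▸ (by simp [hr] : '.' ∈ b ++ r2)) hds
    · have hrest' : a ++ '.' :: (b ++ r2) = ['B'] ++ '.' :: (ds ++ '.' :: rest) := by
        rw [← hrest]; simp
      obtain ⟨rfl, h2⟩ := split_at_dot_inj a ['B'] (b ++ r2) (ds ++ '.' :: rest) ha hB hrest'
      cases hr : r2 with
      | nil =>
        rw [hr, List.append_nil] at h2
        exact absurd (h2 ▸ (by simp : '.' ∈ ds ++ '.' :: rest)) hb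
      | cons c t =>
        obtain rfl := hr2 c t hr
        rw [hr] at h2
        obtain ⟨rfl, -⟩ := split_at_dot_inj b ds t rest hb hds (by simpa using h2)
        exact ⟨rfl, rfl⟩
  · rintro ⟨rfl, rfl⟩
    cases hr : r2 with
    | nil => left; simp
    | cons c t =>
      obtain rfl := hr2 c t hr
      right
      exact ⟨t, by simp⟩

lemma find?_pointwise {α : Type} [BEq α] [LawfulBEq α] (L : List α) (pred : α → Bool) (c : α)
    (h : ∀ q ∈ L, pred q = (c == q)) :
    L.find? pred = if c ∈ L then some c else none := by
  induction L with
  | nil => simp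
  | cons x t ih =>
    have hx : pred x = (c == x) := h x List.mem_cons_self
    by_cases hcx : c = x
    · subst hcx
      rw [List.find?_cons_of_pos (by simp [hx])]
      simp
    · rw [List.find?_cons_of_neg (by simp [hx]; exact hcx)]
      rw [ih (fun q hq => h q (List.mem_cons_of_mem _ hq))]
      simp [List.mem_cons, hcx]

lemma shape_of_mem (q : List Char) (h : q ∈ PARENT_ORDER) :
    ∃ ds, q = 'B' :: '.' :: ds ∧ '.' ∉ ds := by
  fin_cases h <;> exact ⟨_, rfl, by decide⟩

lemma count_dot_of_mem : ∀ q ∈ PARENT_ORDER, q.count '.' = 1 := by decide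

lemma ports_agree (s : String) : parent_section s = parent_section_alt s := by
  have hsplit := splitOn_eq_splitDot s.toList
  have ha : '.' ∉ s.toList.takeWhile (· ≠ '.') := fun hm => by
    simpa using List.mem_takeWhile_imp hm
  rcases hdrop : s.toList.dropWhile (· ≠ '.') with _ | ⟨c, t⟩
  · -- '.' does not occur in s
    have hparts : PySem.Chars.splitOn s.toList ['.'] = [s.toList.takeWhile (· ≠ '.')] := by
      rw [hsplit, splitDot_of_drop_nil _ hdrop]
    have hla : s.toList = s.toList.takeWhile (· ≠ '.') := by
      conv_lhs => rw [← List.takeWhile_append_dropWhile (p := (· ≠ '.')) (l := s.toList)]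
      rw [hdrop, List.append_nil]
    have hnodot : '.' ∉ s.toList := fun hm => ha (hla ▸ hm)
    have hfind : PARENT_ORDER.find? (fun p =>
        s.toList == p || PySem.Chars.startswith s.toList (p ++ ['.'])) = none := by
      rw [List.find?_eq_none]
      intro q hq hpred
      obtain ⟨ds, rfl, -⟩ := shape_of_mem q hq
      simp only [Bool.or_eq_true, beq_iff_eq, PySem.Chars.startswith_iff] at hpred
      rcases hpred with heq | ⟨rest, hrest⟩
      · exact hnodot (heq ▸ (by simp : '.' ∈ 'B' :: '.' :: ds))
      · exact hnodot (hrest ▸ (by simp : '.' ∈ ('B' :: '.' :: ds ++ ['.']) ++ rest))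
    simp only [parent_section, parent_section_alt]
    rw [hparts, hfind]
    simp
  · -- the first dot is at c
    have hc : c = '.' := by
      have h0 := List.head_dropWhile_not (fun x => x ≠ '.') (l := s.toList)
        (w := by rw [hdrop]; simp)
      simp only [hdrop, List.head_cons] at h0
      simpa using h0
    subst hc
    have hb : '.' ∉ t.takeWhile (· ≠ '.') := fun hm => by
      simpa using List.mem_takeWhile_imp hm
    have htbr : t = t.takeWhile (· ≠ '.') ++ t.dropWhile (· ≠ '.') :=
      (List.takeWhile_append_dropWhile).symm
    have hr2 : ∀ c' t', t.dropWhile (· ≠ '.') = c' :: t' → c' = '.' := by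
      intro c' t' hr
      have h0 := List.head_dropWhile_not (fun x => x ≠ '.') (l := t)
        (w := by rw [hr]; simp)
      simp only [hr, List.head_cons] at h0
      simpa using h0
    have hlt : s.toList = s.toList.takeWhile (· ≠ '.') ++ '.' :: t := by
      conv_lhs => rw [← List.takeWhile_append_dropWhile (p := (· ≠ '.')) (l := s.toList)]
      rw [hdrop]
    have hpred : ∀ q ∈ PARENT_ORDER,
        ((s.toList == q) || PySem.Chars.startswith s.toList (q ++ ['.'])) =
          ((s.toList.takeWhile (· ≠ '.') ++ ['.'] ++ t.takeWhile (· ≠ '.') : List Char) == q) := by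
      intro q hq
      obtain ⟨ds, rfl, hds⟩ := shape_of_mem q hq
      have hiff := match_iff (s.toList.takeWhile (· ≠ '.')) (t.takeWhile (· ≠ '.'))
        (t.dropWhile (· ≠ '.')) ds ha hb hds hr2
      have hcand : (s.toList.takeWhile (· ≠ '.') ++ ['.'] ++ t.takeWhile (· ≠ '.')
          = 'B' :: '.' :: ds) ↔ (s.toList.takeWhile (· ≠ '.') = ['B'] ∧ t.takeWhile (· ≠ '.') = ds) := by
        constructor
        · intro h
          exact split_at_dot_inj _ ['B'] _ ds ha (by decide) (by simpa using h)
        · rintro ⟨h1, h2⟩; rw [h1, h2]; rfl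
      refine Bool.eq_iff_iff.mpr ?_
      simp only [Bool.or_eq_true, beq_iff_eq, PySem.Chars.startswith_iff]
      rw [← htbr] at hiff
      rw [← hlt] at hiff
      exact hiff.trans hcand.symm
    have hfind := find?_pointwise PARENT_ORDER _
      (s.toList.takeWhile (· ≠ '.') ++ ['.'] ++ t.takeWhile (· ≠ '.')) hpred
    simp only [parent_section, parent_section_alt]
    rw [hfind]
    by_cases hmem : (s.toList.takeWhile (· ≠ '.') ++ ['.'] ++ t.takeWhile (· ≠ '.')) ∈ PARENT_ORDER
    case pos =>
      have hparts : PySem.Chars.splitOn s.toList ['.']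
          = s.toList.takeWhile (· ≠ '.') :: splitDot t := by
        rw [hsplit, splitDot_of_drop_cons _ _ hdrop]
      rw [hparts, splitDot_unfold (l := t)]
      rw [if_pos hmem]
      simp only [List.length_cons, List.getElem!_cons_zero, List.getElem!_cons_succ]
      rw [if_pos (by omega)]
      rw [if_pos hmem]
    case neg =>
      rw [if_neg hmem]
      rcases hr : t.dropWhile (· ≠ '.') with _ | ⟨c2, t2⟩
      · -- exactly two parts
        have hparts : PySem.Chars.splitOn s.toList ['.']
            = [s.toList.takeWhile (· ≠ '.'), t.takeWhile (· ≠ '.')] := by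
          rw [hsplit, splitDot_of_drop_cons _ _ hdrop, splitDot_of_drop_nil _ hr]
        rw [hparts]
        simp only [List.length_cons, List.length_nil, List.getElem!_cons_zero,
          List.getElem!_cons_succ]
        rw [if_pos (by omega)]
        rw [if_neg hmem]
        rw [show min 3 (((0 + 1 + 1 : Nat) : Int)) = 2 by decide]
        rw [show PySem.List.pyRange 2 1 (-1) = [2] by decide]
        simp only [List.foldl_cons, List.foldl_nil]
        rw [PySem.List.slice_to _ (by norm_num)]
        simp only [show ((2 : Int)).toNat = 2 from rfl, List.take_succ_cons, List.take_nil]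
        rw [show PySem.Chars.join ['.'] [s.toList.takeWhile (· ≠ '.'), t.takeWhile (· ≠ '.')]
            = s.toList.takeWhile (· ≠ '.') ++ ['.'] ++ t.takeWhile (· ≠ '.') by
          simp [PySem.Chars.join, List.intercalate]]
        rw [if_neg hmem]
      · -- three or more parts: the walk-up loop still finds nothing
        obtain rfl := hr2 c2 t2 hr
        rcases hsd2 : splitDot t2 with _ | ⟨m, M3⟩
        · exact absurd hsd2 (splitDot_ne_nil t2)
        have hparts : PySem.Chars.splitOn s.toList ['.']
            = s.toList.takeWhile (· ≠ '.') :: t.takeWhile (· ≠ '.') :: m :: M3 := by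
          rw [hsplit, splitDot_of_drop_cons _ _ hdrop, splitDot_of_drop_cons _ _ hr, hsd2]
        rw [hparts]
        simp only [List.length_cons, List.getElem!_cons_zero, List.getElem!_cons_succ]
        rw [if_pos (by omega)]
        rw [if_neg hmem]
        rw [show min 3 (((M3.length + 1 + 1 + 1 : Nat) : Int)) = 3 by push_cast; omega]
        rw [show PySem.List.pyRange 3 1 (-1) = [3, 2] by decide]
        simp only [List.foldl_cons, List.foldl_nil]
        rw [PySem.List.slice_to _ (by norm_num : (0:Int) ≤ 3),
            PySem.List.slice_to _ (by norm_num : (0:Int) ≤ 2)]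
        simp only [show ((3 : Int)).toNat = 3 from rfl, show ((2 : Int)).toNat = 2 from rfl,
          List.take_succ_cons, List.take_zero]
        rw [show PySem.Chars.join ['.']
              [s.toList.takeWhile (· ≠ '.'), t.takeWhile (· ≠ '.'), m]
            = s.toList.takeWhile (· ≠ '.') ++ ['.'] ++ t.takeWhile (· ≠ '.') ++ ['.'] ++ m by
          simp [PySem.Chars.join, List.intercalate]]
        have hm3 : (s.toList.takeWhile (· ≠ '.') ++ ['.'] ++ t.takeWhile (· ≠ '.') ++ ['.'] ++ m)
            ∉ PARENT_ORDER := by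
          intro hmm
          have hcount := count_dot_of_mem _ hmm
          simp [List.count_append] at hcount
          omega
        rw [if_neg hm3]
        rw [show PySem.Chars.join ['.'] [s.toList.takeWhile (· ≠ '.'), t.takeWhile (· ≠ '.')]
            = s.toList.takeWhile (· ≠ '.') ++ ['.'] ++ t.takeWhile (· ≠ '.') by
          simp [PySem.Chars.join, List.intercalate]]
        rw [if_neg hmem]

-- ===== VERDICT (by name: the statement is the Claim_ definition above) =====
theorem parent_section_spec : Claim_equal_parent_section := by
  intro s _
  unfold Spec_parent_section
  exact ports_agree s
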